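-- pv_equiv track=rewrite | github.com/muhammadkodir-alijonov/adventofcode | 2025/day1/1.2.py | calculate_l_r_point
-- ===== SOURCE A (Python) =====
-- def calculate_l_r_point(data) -> int | None:
--     start_point = 50
--     count = 0
--     size = 100
--     for nthe_data in data:
--         if not nthe_data:
--             continue
--         prev_point = start_point
--         if nthe_data.startswith('L'):
--             step = int(nthe_data[1:])
--             start_point = (start_point - step) % size
--             full_rotations = step // size
--             count += full_rotations
--             for i in range(1, step % size + 1):
--                 pos = (prev_point - i) % size
--                 if pos == 0:
--                     count += 1
--         elif nthe_data.startswith('R'):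
--             step = int(nthe_data[1:])
--             start_point = (start_point + step) % size
--             full_rotations = step // size
--             count += full_rotations
--             for i in range(1, step % size + 1):
--                 pos = (prev_point + i) % size
--                 if pos == 0:
--                     count += 1
--     return count
-- ===== SOURCE B (Python) =====
-- def calculate_l_r_point(data) -> int | None:
--     # O(1) per line: arithmetic test of whether the single partial-turn zero crossing falls in range
--     pos = 50
--     count = 0
--     for line in data:
--         if not line or line[0] not in ('L', 'R'):
--             continue
--         step = int(line[1:])
--         count += step // 100
--         r = step % 100
--         if line[0] == 'L':
--             if 1 <= pos <= r:
--                 count += 1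
--             pos = (pos - r) % 100
--         else:
--             if pos + r >= 100:
--                 count += 1
--             pos = (pos + r) % 100
--     return count
-- ===== Notes on version B (the rewrite author's own statement) =====
-- stated objective: faster
-- what changed: B removes A's inner simulation loop over the step%100 single moves and replaces it with an O(1) arithmetic test of whether the one possible zero-crossing index of the partial turn lies in range.
import Mathlib
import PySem

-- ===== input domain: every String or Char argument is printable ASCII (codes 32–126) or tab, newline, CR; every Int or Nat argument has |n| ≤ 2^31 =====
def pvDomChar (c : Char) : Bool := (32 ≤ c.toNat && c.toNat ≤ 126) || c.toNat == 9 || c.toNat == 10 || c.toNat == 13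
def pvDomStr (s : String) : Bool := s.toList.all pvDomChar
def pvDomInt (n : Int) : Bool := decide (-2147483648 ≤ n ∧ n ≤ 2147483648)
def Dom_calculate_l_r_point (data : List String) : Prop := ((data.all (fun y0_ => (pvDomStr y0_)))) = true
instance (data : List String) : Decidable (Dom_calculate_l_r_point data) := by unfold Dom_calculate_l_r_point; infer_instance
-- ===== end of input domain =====

-- B replaces A's inner simulation loop over step % 100 single moves by an O(1) arithmetic
-- test of whether the one possible zero-crossing index of the partial turn falls in range.

-- ===== PORT A =====
-- one iteration of A's `for nthe_data in data` loop over state (start_point, count)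
def pvA_step (st : Int × Int) (s : String) : Int × Int :=
  if s.toList = [] then st          -- `if not nthe_data: continue`
  else
    let prev := st.1
    if PySem.Str.startswith s "L" then
      match PySem.Int.ofStr? (PySem.Str.slice s (some 1) none) with
      | none => st                   -- int() raises ValueError: excluded by Pre_
      | some step =>
          let sp := PySem.Int.mod (st.1 - step) 100
          let c1 := st.2 + PySem.Int.floordiv step 100
          let c2 := (PySem.List.pyRange 1 (PySem.Int.mod step 100 + 1) 1).foldl
            (fun c i => if PySem.Int.mod (prev - i) 100 = 0 then c + 1 else c) c1
          (sp, c2)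
    else if PySem.Str.startswith s "R" then
      match PySem.Int.ofStr? (PySem.Str.slice s (some 1) none) with
      | none => st                   -- int() raises ValueError: excluded by Pre_
      | some step =>
          let sp := PySem.Int.mod (st.1 + step) 100
          let c1 := st.2 + PySem.Int.floordiv step 100
          let c2 := (PySem.List.pyRange 1 (PySem.Int.mod step 100 + 1) 1).foldl
            (fun c i => if PySem.Int.mod (prev + i) 100 = 0 then c + 1 else c) c1
          (sp, c2)
    else st

def calculate_l_r_point (data : List String) : Int :=
  (data.foldl pvA_step (50, 0)).2

-- ===== PORT B =====
-- one iteration of B's loop over state (pos, count); no inner loop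
def pvB_step (st : Int × Int) (s : String) : Int × Int :=
  match PySem.Str.pyGet? s 0 with          -- line[0] (none = empty line, skipped)
  | none => st
  | some c =>
    if c = 'L' ∨ c = 'R' then
      match PySem.Int.ofStr? (PySem.Str.slice s (some 1) none) with
      | none => st                   -- int() raises ValueError: excluded by Pre_
      | some step =>
          let cnt := st.2 + PySem.Int.floordiv step 100
          let r := PySem.Int.mod step 100
          if c = 'L' then
            (PySem.Int.mod (st.1 - r) 100, if 1 ≤ st.1 ∧ st.1 ≤ r then cnt + 1 else cnt)
          else
            (PySem.Int.mod (st.1 + r) 100, if 100 ≤ st.1 + r then cnt + 1 else cnt)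
    else st

def calculate_l_r_point_alt (data : List String) : Int :=
  (data.foldl pvB_step (50, 0)).2

-- ===== PRECONDITION & SPEC =====
-- Pre_ excludes exactly the inputs where A raises ValueError: a line starting with 'L'/'R'
-- whose tail is not a valid int literal (e.g. "L", "Rx").
def Pre_calculate_l_r_point (data : List String) : Prop :=
  ∀ s ∈ data, (PySem.Str.startswith s "L" = true ∨ PySem.Str.startswith s "R" = true) →
    (PySem.Int.ofStr? (PySem.Str.slice s (some 1) none)).isSome = true
instance (data : List String) : Decidable (Pre_calculate_l_r_point data) := by
  unfold Pre_calculate_l_r_point; infer_instance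
def pvWitness_calculate_l_r_point : List String := ["L51", "R100", "", "x7"]

def Spec_calculate_l_r_point (data : List String) (out : Int) : Prop := out = calculate_l_r_point_alt data
instance (data : List String) (out : Int) : Decidable (Spec_calculate_l_r_point data out) := by unfold Spec_calculate_l_r_point; infer_instance

-- ===== CLAIM (what is proved, stated in full; the proofs are below) =====
def Claim_equal_calculate_l_r_point : Prop := ∀ (data : List String), Dom_calculate_l_r_point data → Pre_calculate_l_r_point data → Spec_calculate_l_r_point data (calculate_l_r_point data)

-- ===== LEMMAS AND PROOFS =====

-- A's inner L-loop counts 1 iff the crossing index `p` lies in 1..r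
theorem pvL_count (n : Nat) (hn : n < 100) (p : Int) (hp0 : 0 ≤ p) (hp : p < 100) (c : Int) :
    (PySem.List.pyRange 1 ((n : Int) + 1) 1).foldl
      (fun c i => if PySem.Int.mod (p - i) 100 = 0 then c + 1 else c) c
    = if 1 ≤ p ∧ p ≤ (n : Int) then c + 1 else c := by
  induction n generalizing c with
  | zero =>
      rw [PySem.List.pyRange_one_eq_nil (by norm_num)]
      simp; omega
  | succ m ih =>
      have h1 : (1 : Int) ≤ (m : Int) + 1 := by omega
      have : ((m + 1 : Nat) : Int) + 1 = ((m : Int) + 1) + 1 := by push_cast; ring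
      rw [this, PySem.List.pyRange_one_succ_right h1, List.foldl_append,
        ih (by omega)]
      have hmod : PySem.Int.mod (p - ((m : Int) + 1)) 100 = 0 ↔ p = (m : Int) + 1 := by
        rw [PySem.Int.mod_eq_zero_iff_dvd]
        constructor
        · intro h; omega
        · intro h; omega
      simp only [List.foldl]
      split_ifs with h1' h2 h3 h4 h5 h6 h7 <;> push_cast at * <;>
        first | rfl | (exfalso; rw [hmod] at *; omega)

-- A's inner R-loop counts 1 iff the crossing index `100 - p` lies in 1..r
theorem pvR_count (n : Nat) (hn : n < 100) (p : Int) (hp0 : 0 ≤ p) (hp : p < 100) (c : Int) :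
    (PySem.List.pyRange 1 ((n : Int) + 1) 1).foldl
      (fun c i => if PySem.Int.mod (p + i) 100 = 0 then c + 1 else c) c
    = if 100 ≤ p + (n : Int) then c + 1 else c := by
  induction n generalizing c with
  | zero =>
      rw [PySem.List.pyRange_one_eq_nil (by norm_num)]
      simp; omega
  | succ m ih =>
      have h1 : (1 : Int) ≤ (m : Int) + 1 := by omega
      have : ((m + 1 : Nat) : Int) + 1 = ((m : Int) + 1) + 1 := by push_cast; ring
      rw [this, PySem.List.pyRange_one_succ_right h1, List.foldl_append,
        ih (by omega)]
      have hmod : PySem.Int.mod (p + ((m : Int) + 1)) 100 = 0 ↔ p + ((m : Int) + 1) = 100 := by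
        rw [PySem.Int.mod_eq_zero_iff_dvd]
        constructor
        · intro h; omega
        · intro h; omega
      simp only [List.foldl]
      split_ifs with h1' h2 h3 h4 h5 h6 h7 <;> push_cast at * <;>
        first | rfl | (exfalso; rw [hmod] at *; omega)

-- the two per-line step functions agree whenever the pointer is in 0..99
theorem pv_head_some (s : String) (c : Char) (cs : List Char) (hs : s.toList = c :: cs) :
    PySem.Str.pyGet? s 0 = some c := by
  simp only [PySem.Str.pyGet?_eq, PySem.Chars.pyGet?_eq_listPyGet?, hs]
  simp [PySem.List.pyGet?, PySem.List.pyIdx?]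

theorem pv_step_eq (st : Int × Int) (h0 : 0 ≤ st.1) (h1 : st.1 < 100) (s : String) :
    pvA_step st s = pvB_step st s := by
  cases hs : s.toList with
  | nil =>
      have hget : PySem.Str.pyGet? s 0 = none := by
        simp only [PySem.Str.pyGet?_eq, PySem.Chars.pyGet?_eq_listPyGet?, hs]
        simp [PySem.List.pyGet?, PySem.List.pyIdx?]
      unfold pvA_step pvB_step
      rw [if_pos hs, hget]
  | cons c cs =>
      have hget : PySem.Str.pyGet? s 0 = some c := pv_head_some s c cs hs
      have hL : PySem.Str.startswith s "L" = true ↔ c = 'L' := by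
        rw [PySem.Str.startswith_eq, PySem.Chars.startswith_iff, hs]
        show ['L'] <+: c :: cs ↔ c = 'L'
        simp [List.cons_prefix_cons, eq_comm]
      have hR : PySem.Str.startswith s "R" = true ↔ c = 'R' := by
        rw [PySem.Str.startswith_eq, PySem.Chars.startswith_iff, hs]
        show ['R'] <+: c :: cs ↔ c = 'R'
        simp [List.cons_prefix_cons, eq_comm]
      cases hparse : PySem.Int.ofStr? (PySem.Str.slice s (some 1) none) with
      | none =>
          unfold pvA_step pvB_step
          simp only [hget, hparse]
          rw [if_neg (by simp [hs])]
          by_cases hcL : c = 'L'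
          · rw [if_pos (hL.mpr hcL), if_pos (Or.inl hcL)]
          · by_cases hcR : c = 'R'
            · rw [if_neg (by rw [hL]; exact hcL), if_pos (hR.mpr hcR), if_pos (Or.inr hcR)]
            · rw [if_neg (by rw [hL]; exact hcL), if_neg (by rw [hR]; exact hcR),
                if_neg (by simp [hcL, hcR])]
      | some step =>
          have hm0 : 0 ≤ PySem.Int.mod step 100 := PySem.Int.mod_nonneg _ (by norm_num)
          have hm1 : PySem.Int.mod step 100 < 100 := PySem.Int.mod_lt _ (by norm_num)
          have hcast : ((PySem.Int.mod step 100).toNat : Int) = PySem.Int.mod step 100 :=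
            Int.toNat_of_nonneg hm0
          unfold pvA_step pvB_step
          simp only [hget, hparse]
          rw [if_neg (by simp [hs])]
          by_cases hcL : c = 'L'
          · rw [if_pos (hL.mpr hcL), if_pos (Or.inl hcL), if_pos hcL]
            have hcnt := pvL_count (PySem.Int.mod step 100).toNat (by omega) st.1 h0 h1
              (st.2 + PySem.Int.floordiv step 100)
            rw [hcast] at hcnt
            have hpos : PySem.Int.mod (st.1 - step) 100
                = PySem.Int.mod (st.1 - PySem.Int.mod step 100) 100 := by
              rw [PySem.Int.mod_eq_emod_of_pos (by norm_num),
                PySem.Int.mod_eq_emod_of_pos (by norm_num),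
                PySem.Int.mod_eq_emod_of_pos (by norm_num)]
              omega
            rw [hcnt, hpos]
          · by_cases hcR : c = 'R'
            · rw [if_neg (by rw [hL]; exact hcL), if_pos (hR.mpr hcR), if_pos (Or.inr hcR),
                if_neg (show ¬ c = 'L' from hcL)]
              have hcnt := pvR_count (PySem.Int.mod step 100).toNat (by omega) st.1 h0 h1
                (st.2 + PySem.Int.floordiv step 100)
              rw [hcast] at hcnt
              have hpos : PySem.Int.mod (st.1 + step) 100
                  = PySem.Int.mod (st.1 + PySem.Int.mod step 100) 100 := by
                rw [PySem.Int.mod_eq_emod_of_pos (by norm_num),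
                  PySem.Int.mod_eq_emod_of_pos (by norm_num),
                  PySem.Int.mod_eq_emod_of_pos (by norm_num)]
                omega
              rw [hcnt, hpos]
            · rw [if_neg (by rw [hL]; exact hcL), if_neg (by rw [hR]; exact hcR),
                if_neg (by simp [hcL, hcR])]

theorem pvB_pos_inv (st : Int × Int) (h0 : 0 ≤ st.1) (h1 : st.1 < 100) (s : String) :
    0 ≤ (pvB_step st s).1 ∧ (pvB_step st s).1 < 100 := by
  unfold pvB_step
  cases hget : PySem.Str.pyGet? s 0 with
  | none => exact ⟨h0, h1⟩
  | some c =>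
    cases hparse : PySem.Int.ofStr? (PySem.Str.slice s (some 1) none) with
    | none =>
        simp only [hparse]
        by_cases hc : c = 'L' ∨ c = 'R'
        · rw [if_pos hc]; exact ⟨h0, h1⟩
        · rw [if_neg hc]; exact ⟨h0, h1⟩
    | some step =>
        simp only [hparse]
        by_cases hc : c = 'L' ∨ c = 'R'
        · rw [if_pos hc]
          by_cases hcL : c = 'L' <;>
            simp [hcL] <;> constructor <;> omega
        · rw [if_neg hc]; exact ⟨h0, h1⟩

theorem pv_fold_eq (data : List String) (st : Int × Int) (h0 : 0 ≤ st.1) (h1 : st.1 < 100) :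
    data.foldl pvA_step st = data.foldl pvB_step st := by
  induction data generalizing st with
  | nil => rfl
  | cons s rest ih =>
      simp only [List.foldl_cons, pv_step_eq st h0 h1 s]
      exact ih _ (pvB_pos_inv st h0 h1 s).1 (pvB_pos_inv st h0 h1 s).2

-- ===== VERDICT (by name: the statement is the Claim_ definition above) =====
theorem calculate_l_r_point_spec : Claim_equal_calculate_l_r_point := by
  intro data _ _
  unfold Spec_calculate_l_r_point calculate_l_r_point calculate_l_r_point_alt
  rw [pv_fold_eq data (50, 0) (by norm_num) (by norm_num)]
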